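-- pv_equiv track=rewrite | github.com/thepratholic/LeetCode-and-GFG-Daily-POTD | LeetCode/Minimize the Maximum Difference of Pairs.py | f
-- ===== SOURCE A (Python) =====
-- def f(mid, nums, p):
--     cnt = 0
--     n = len(nums)
--     i = 0
--     while i < n - 1:
--         if(nums[i + 1] - nums[i] <= mid):
--             cnt += 1
--             i += 2
--         else:
--             i += 1
--
--     return cnt >= p
-- ===== SOURCE B (Python) =====
-- def f(mid, nums, p):
--     # Backward DP over adjacent pairs with two rolling values:
--     # best1 = max disjoint pairs (gap <= mid) in the suffix starting at i,
--     # best2 = same for the suffix starting at i+1.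
--     best1 = 0
--     best2 = 0
--     for a, b in reversed(list(zip(nums, nums[1:]))):
--         cur = max(best1, (1 if b - a <= mid else 0) + best2)
--         best2 = best1
--         best1 = cur
--     return best1 >= p
-- ===== Notes on version B (the rewrite author's own statement) =====
-- stated objective: alternative
-- what changed: Replaces the greedy forward index-skipping scan by a backward dynamic program over adjacent pairs keeping two rolling suffix optima and comparing the DP maximum matching to p.
import Mathlib
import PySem

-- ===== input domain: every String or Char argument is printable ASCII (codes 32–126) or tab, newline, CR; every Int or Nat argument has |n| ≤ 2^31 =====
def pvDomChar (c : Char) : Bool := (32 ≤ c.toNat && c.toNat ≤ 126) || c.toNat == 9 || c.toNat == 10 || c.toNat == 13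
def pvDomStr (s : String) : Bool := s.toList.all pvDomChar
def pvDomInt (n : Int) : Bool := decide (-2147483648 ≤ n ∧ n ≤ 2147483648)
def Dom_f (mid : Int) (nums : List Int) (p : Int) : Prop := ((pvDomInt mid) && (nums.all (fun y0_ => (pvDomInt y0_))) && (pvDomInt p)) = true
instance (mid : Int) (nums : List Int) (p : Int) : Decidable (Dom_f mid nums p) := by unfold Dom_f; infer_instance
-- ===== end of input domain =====

-- B replaces A's greedy forward skip-scan by a backward DP over adjacent pairs
-- with two rolling suffix optima (alternative algorithm, same cost).


-- ===== PORT A =====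
-- A's while loop: i skips by 2 on a taken pair, by 1 otherwise (indices always in range by the guard).
def loopA (mid : Int) (nums : List Int) (i : Nat) (cnt : Int) : Int :=
  if i + 1 < nums.length then
    if PySem.List.pyGetD nums ((i : Int) + 1) 0 - PySem.List.pyGetD nums (i : Int) 0 ≤ mid then
      loopA mid nums (i + 2) (cnt + 1)
    else
      loopA mid nums (i + 1) cnt
  else cnt
termination_by nums.length - i

def f (mid : Int) (nums : List Int) (p : Int) : Bool :=
  decide (loopA mid nums 0 0 ≥ p)

-- ===== PORT B =====
-- Source B's loop body: (best1, best2) ↦ (max best1 ((gap ≤ mid) + best2), best1), over the reversed pair list.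
def stepB (mid : Int) (acc : Int × Int) (ab : Int × Int) : Int × Int :=
  (max acc.1 ((if ab.2 - ab.1 ≤ mid then (1 : Int) else 0) + acc.2), acc.1)

def f_alt (mid : Int) (nums : List Int) (p : Int) : Bool :=
  let r := ((nums.zip nums.tail).reverse).foldl (stepB mid) ((0 : Int), (0 : Int))
  decide (r.1 ≥ p)

-- ===== PRECONDITION & SPEC =====
def Spec_f (mid : Int) (nums : List Int) (p : Int) (out : Bool) : Prop := out = f_alt mid nums p
instance (mid : Int) (nums : List Int) (p : Int) (out : Bool) : Decidable (Spec_f mid nums p out) := by unfold Spec_f; infer_instance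

-- ===== CLAIM (what is proved, stated in full; the proofs are below) =====
def Claim_equal_f : Prop := ∀ (mid : Int) (nums : List Int) (p : Int), Dom_f mid nums p → Spec_f mid nums p (f mid nums p)

-- ===== LEMMAS AND PROOFS =====

-- Greedy count, stated structurally on the suffix list.
def g (mid : Int) : List Int → Int
  | a :: b :: t => if b - a ≤ mid then 1 + g mid t else g mid (b :: t)
  | _ => 0

-- DP optimum: max number of disjoint adjacent pairs with gap ≤ mid.
def dp (mid : Int) : List Int → Int
  | a :: b :: t => max (dp mid (b :: t)) ((if b - a ≤ mid then (1 : Int) else 0) + dp mid t)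
  | _ => 0

theorem dp_nonneg (mid : Int) (l : List Int) : 0 ≤ dp mid l := by
  fun_induction dp mid l with
  | case1 a b t ih1 ih2 => simp [dp]; left; exact ih1
  | case2 l h => simp [dp]

theorem dp_le_cons (mid : Int) (x : Int) (t : List Int) : dp mid t ≤ dp mid (x :: t) := by
  cases t with
  | nil => simp [dp]
  | cons b u => exact le_max_left _ _

theorem dp_cons_le (mid : Int) (x : Int) (t : List Int) : dp mid (x :: t) ≤ 1 + dp mid t := by
  cases t with
  | nil => simp [dp]
  | cons b u =>
    have h1 : dp mid (b :: u) ≤ 1 + dp mid (b :: u) := by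
      have := dp_nonneg mid (b :: u); omega
    have h2 : (if b - x ≤ mid then (1 : Int) else 0) + dp mid u ≤ 1 + dp mid (b :: u) := by
      have := dp_le_cons mid b u
      split <;> omega
    exact max_le h1 h2

theorem g_eq_dp (mid : Int) (l : List Int) : g mid l = dp mid l := by
  fun_induction g mid l with
  | case1 a b t h ih =>
    have hle := dp_cons_le mid b t
    simp only [dp, if_pos h, ih]
    omega
  | case2 a b t h ih =>
    have hle := dp_le_cons mid b t
    simp only [dp, if_neg h, ih]
    omega
  | case3 l h => cases l with
    | nil => rfl
    | cons a t => cases t with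
      | nil => rfl
      | cons b u => exact absurd rfl (h a b u)

theorem loopA_eq (mid : Int) (nums : List Int) (i : Nat) (cnt : Int) :
    loopA mid nums i cnt = cnt + g mid (nums.drop i) := by
  fun_induction loopA mid nums i cnt with
  | case1 i cnt hlt hcond ih =>
    have hi : i < nums.length := by omega
    have hi1 : i + 1 < nums.length := hlt
    have hd1 : nums.drop i = nums[i] :: nums.drop (i + 1) := List.drop_eq_getElem_cons hi
    have hd2 : nums.drop (i + 1) = nums[i + 1] :: nums.drop (i + 2) := List.drop_eq_getElem_cons hi1
    have hcast : (i : Int) + 1 = ((i + 1 : Nat) : Int) := by push_cast; ring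
    rw [hcast, PySem.List.pyGetD_natCast, PySem.List.pyGetD_natCast,
      List.getD_eq_getElem _ _ hi1, List.getD_eq_getElem _ _ hi] at hcond
    rw [ih, hd1, hd2]
    simp only [g, if_pos hcond]
    ring
  | case2 i cnt hlt hcond ih =>
    have hi : i < nums.length := by omega
    have hi1 : i + 1 < nums.length := hlt
    have hd1 : nums.drop i = nums[i] :: nums.drop (i + 1) := List.drop_eq_getElem_cons hi
    have hd2 : nums.drop (i + 1) = nums[i + 1] :: nums.drop (i + 2) := List.drop_eq_getElem_cons hi1
    have hcast : (i : Int) + 1 = ((i + 1 : Nat) : Int) := by push_cast; ring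
    rw [hcast, PySem.List.pyGetD_natCast, PySem.List.pyGetD_natCast,
      List.getD_eq_getElem _ _ hi1, List.getD_eq_getElem _ _ hi] at hcond
    rw [ih, hd1, hd2]
    simp only [g, if_neg hcond]
  | case3 i cnt h =>
    have : (nums.drop i).length ≤ 1 := by
      rw [List.length_drop]; omega
    rcases hl : nums.drop i with _ | ⟨a, t⟩
    · simp [g]
    · rcases ht : t with _ | ⟨b, u⟩
      · simp [g]
      · rw [hl, ht] at this; simp at this

theorem foldB_eq (mid : Int) (l : List Int) :
    (l.zip l.tail).foldr (fun ab acc => stepB mid acc ab) ((0 : Int), (0 : Int))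
      = (dp mid l, dp mid l.tail) := by
  induction l with
  | nil => rfl
  | cons a t ih =>
    cases t with
    | nil => rfl
    | cons b u =>
      simp only [List.tail_cons, List.zip_cons_cons, List.foldr_cons] at ih ⊢
      rw [ih]
      simp [stepB, dp]

theorem f_eq_f_alt (mid : Int) (nums : List Int) (p : Int) : f mid nums p = f_alt mid nums p := by
  unfold f f_alt
  rw [List.foldl_reverse, foldB_eq, loopA_eq, g_eq_dp]
  simp

-- ===== VERDICT (by name: the statement is the Claim_ definition above) =====
theorem f_spec : Claim_equal_f := by
  intro mid nums p _
  exact (f_eq_f_alt mid nums p).symm ▸ rfl
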